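-- pv_equiv track=rewrite | github.com/pypi-data/pypi-mirror-401 | packages/listing-generator/listing_generator-0.10.2.tar.gz/listing_generator-0.10.2/lg/rendering/labels.py | _minimal_unique_suffixes
-- ===== SOURCE A (Python) =====
-- from typing import Dict, Iterable, List, Tuple
--
-- def _join(parts: List[str]) -> str:
--     return "/".join(parts)
--
-- def _minimal_unique_suffixes(paths: List[List[str]]) -> List[str]:
--     """
--     For each path, select the minimal unique suffix (by components from the right).
--     Example: ["lg","engine.py"], ["io","engine.py"] → "lg/engine.py", "io/engine.py".
--     """
--     n = len(paths)
--     # Start with basename (last component)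
--     suffix_len = [1] * n
--
--     def key(i: int) -> Tuple[str, ...]:
--         return tuple(paths[i][-suffix_len[i] :])
--
--     changed = True
--     while changed:
--         changed = False
--         seen: Dict[Tuple[str, ...], int] = {}
--         clash: Dict[Tuple[str, ...], int] = {}
--
--         for i in range(n):
--             k = key(i)
--             if k in seen:
--                 clash[k] = 1
--             else:
--                 seen[k] = 1
--
--         if not clash:
--             break
--
--         for i in range(n):
--             k = key(i)
--             if k in clash:
--                 # Increase suffix if possible
--                 if suffix_len[i] < len(paths[i]):
--                     suffix_len[i] += 1
--                     changed = True
--         # Loop ends when collisions disappear or all reach the full path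
--
--     out: List[str] = []
--     for i in range(n):
--         out.append(_join(paths[i][-suffix_len[i] :]))
--     return out
-- ===== SOURCE B (Python) =====
-- def _minimal_unique_suffixes(paths):
--     """
--     For each path, select the minimal unique suffix (by components from the right).
--     One pass builds a counter of every right-suffix of every path; a second pass
--     picks, for each path, the shortest suffix whose count is 1 (full path if none).
--     """
--     counts = {}
--     for p in paths:
--         for d in range(1, len(p) + 1):
--             k = tuple(p[len(p) - d:])
--             counts[k] = counts.get(k, 0) + 1
--     out = []
--     for p in paths:
--         L = len(p)
--         for d in range(1, len(p) + 1):
--             if counts.get(tuple(p[len(p) - d:]), 0) == 1: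
--                 L = d
--                 break
--         out.append("/".join(p[len(p) - L:]))
--     return out
-- ===== Notes on version B (the rewrite author's own statement) =====
-- stated objective: alternative
-- what changed: A synchronously grows all clashing suffix lengths in repeated whole-list rounds until a fixpoint; B makes one pass building a counter of every right-suffix of every path and then, independently per path, picks the shortest suffix with count 1 (full path if none) - no rounds, no fixpoint.
import Mathlib
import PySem

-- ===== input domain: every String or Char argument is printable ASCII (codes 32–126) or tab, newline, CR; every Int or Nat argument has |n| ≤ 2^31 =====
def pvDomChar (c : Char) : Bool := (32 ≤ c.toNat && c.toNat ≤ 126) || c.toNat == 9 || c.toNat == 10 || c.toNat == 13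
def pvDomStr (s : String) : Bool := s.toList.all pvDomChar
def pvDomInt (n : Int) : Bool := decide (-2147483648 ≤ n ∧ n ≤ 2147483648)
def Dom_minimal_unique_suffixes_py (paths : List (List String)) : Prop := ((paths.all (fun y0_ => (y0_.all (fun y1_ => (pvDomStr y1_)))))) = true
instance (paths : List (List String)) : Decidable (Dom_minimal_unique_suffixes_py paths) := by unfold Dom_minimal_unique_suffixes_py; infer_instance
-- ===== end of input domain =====

-- B replaces A's synchronous rounds of growing all clashing suffix lengths by one counter of
-- all right-suffixes plus an independent per-path scan for the shortest suffix with count 1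
-- (alternative decomposition; same results, proved equal below).


-- ===== PORT A =====
-- key(i): paths[i][-suffix_len[i]:]  (negative-start slice, exact via PySem.List.slice)
def pvKeyA (p : List String) (L : Nat) : List String :=
  PySem.List.slice p (some (-(L : Int))) none

-- first for-loop of a round: builds the 'seen' and 'clash' dicts
def pvPass1 (ks : List (List String)) :
    PySem.Dict (List String) Nat × PySem.Dict (List String) Nat :=
  ks.foldl (fun sc k =>
      if sc.1.contains k then (sc.1, sc.2.insert k 1) else (sc.1.insert k 1, sc.2))
    (PySem.Dict.empty, PySem.Dict.empty)

-- second for-loop of a round: extends clashing suffixes where possible; also tracks 'changed'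
def pvPass2 (cl : PySem.Dict (List String) Nat) (st : List (List String × Nat)) :
    List (List String × Nat) × Bool :=
  st.foldl (fun acc pl =>
      if cl.contains (pvKeyA pl.1 pl.2) then
        if pl.2 < pl.1.length then (acc.1 ++ [(pl.1, pl.2 + 1)], true)
        else (acc.1 ++ [pl], acc.2)
      else (acc.1 ++ [pl], acc.2))
    ([], false)

-- the 'while changed' loop; the state zips paths with their suffix_len entries.
-- fuel only makes the recursion structural; it is proved sufficient below
-- (each continuing round increases some suffix length, bounded by the total length).
def pvLoopA (fuel : Nat) (st : List (List String × Nat)) : List (List String × Nat) :=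
  match fuel with
  | 0 => st
  | fuel + 1 =>
    if (pvPass1 (st.map (fun pl => pvKeyA pl.1 pl.2))).2.size = 0 then st
    else if (pvPass2 (pvPass1 (st.map (fun pl => pvKeyA pl.1 pl.2))).2 st).2 then
      pvLoopA fuel (pvPass2 (pvPass1 (st.map (fun pl => pvKeyA pl.1 pl.2))).2 st).1
    else (pvPass2 (pvPass1 (st.map (fun pl => pvKeyA pl.1 pl.2))).2 st).1

def minimal_unique_suffixes_py (paths : List (List String)) : List String :=
  let fin := pvLoopA (paths.foldl (fun a p => a + p.length) 0 + 2)
      (paths.map (fun p => (p, 1)))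
  fin.foldl (fun out pl => out ++ [PySem.Str.join "/" (pvKeyA pl.1 pl.2)]) []

-- ===== PORT B =====
-- p[len(p)-i:]  (non-negative-start slice; B only forms it for 0 ≤ i ≤ len(p))
def pvKeyB (p : List String) (i : Int) : List String :=
  PySem.List.slice p (some ((p.length : Int) - i)) none

-- counter of every right-suffix (as tuple) of every path
def pvCounts (paths : List (List String)) : PySem.Dict (List String) Int :=
  paths.foldl (fun d p =>
      (PySem.List.pyRange 1 ((p.length : Int) + 1)).foldl
        (fun d i => d.modify (pvKeyB p i) 0 (· + 1)) d)
    PySem.Dict.empty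

def minimal_unique_suffixes_py_alt (paths : List (List String)) : List String :=
  paths.foldl (fun out p =>
      out ++ [PySem.Str.join "/" (pvKeyB p
        (((PySem.List.pyRange 1 ((p.length : Int) + 1)).find?
            (fun i => (pvCounts paths).getD (pvKeyB p i) 0 == 1)).getD (p.length : Int)))])
    []

-- ===== PRECONDITION & SPEC =====
def Spec_minimal_unique_suffixes_py (paths : List (List String)) (out : List String) : Prop := out = minimal_unique_suffixes_py_alt paths
instance (paths : List (List String)) (out : List String) : Decidable (Spec_minimal_unique_suffixes_py paths out) := by unfold Spec_minimal_unique_suffixes_py; infer_instance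

-- ===== CLAIM (what is proved, stated in full; the proofs are below) =====
def Claim_equal_minimal_unique_suffixes_py : Prop := ∀ (paths : List (List String)), Dom_minimal_unique_suffixes_py paths → Spec_minimal_unique_suffixes_py paths (minimal_unique_suffixes_py paths)

-- ===== LEMMAS AND PROOFS =====

-- spec-side notions: the suffix of the last d components, and how many paths carry a given suffix
def pvSuf (p : List String) (d : Nat) : List String := p.drop (p.length - d)

def pvCnt (paths : List (List String)) (k : List String) : Nat :=
  paths.countP (fun q => decide (k.length ≤ q.length) && (pvSuf q k.length == k))

-- the common value both programs converge to: the least d ∈ [1, len p] whose suffix is unique,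
-- else max (len p) 1
def pvMA (paths : List (List String)) (p : List String) : Nat :=
  (((List.range' 1 p.length).find? (fun d => pvCnt paths (pvSuf p d) == 1)).getD (max p.length 1))

theorem pvSuf_length (p : List String) (d : Nat) : (pvSuf p d).length = min d p.length := by
  simp [pvSuf]; omega

theorem pvSuf_pvSuf (p : List String) (d L : Nat) (h : d ≤ L) :
    pvSuf (pvSuf p L) d = pvSuf p d := by
  simp only [pvSuf, List.length_drop, List.drop_drop]
  congr 1; omega

theorem pvSuf_truncate (p : List String) (L : Nat) : pvSuf p (min L p.length) = pvSuf p L := by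
  simp only [pvSuf]; congr 1; omega

theorem pvKeyA_eq (p : List String) (L : Nat) (h : 1 ≤ L) : pvKeyA p L = pvSuf p L := by
  simp [pvKeyA, PySem.List.slice_from_neg_natCast p L h, pvSuf]

theorem pvKeyB_eq (p : List String) (i : Int) (h0 : 0 ≤ i) (h : i ≤ (p.length : Int)) :
    pvKeyB p i = pvSuf p i.toNat := by
  rw [pvKeyB, PySem.List.slice_from p (by omega), pvSuf]
  have hn : ((p.length : Int) - i).toNat = p.length - i.toNat := by omega
  rw [hn]

theorem pvMA_one_le (paths : List (List String)) (p : List String) : 1 ≤ pvMA paths p := by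
  unfold pvMA
  cases hf : (List.range' 1 p.length).find? (fun d => pvCnt paths (pvSuf p d) == 1) with
  | none => simp
  | some b =>
    have := List.mem_of_find?_eq_some hf
    rw [List.mem_range'_1] at this
    simpa using this.1

theorem pvMA_le (paths : List (List String)) (p : List String) :
    pvMA paths p ≤ max p.length 1 := by
  unfold pvMA
  cases hf : (List.range' 1 p.length).find? (fun d => pvCnt paths (pvSuf p d) == 1) with
  | none => simp
  | some b =>
    have := List.mem_of_find?_eq_some hf
    rw [List.mem_range'_1] at this
    simp; omega

theorem pvMA_min (paths : List (List String)) (p : List String) (d : Nat)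
    (h1 : 1 ≤ d) (h2 : d < pvMA paths p) : pvCnt paths (pvSuf p d) ≠ 1 := by
  have hle := pvMA_le paths p
  unfold pvMA at h2
  cases hf : (List.range' 1 p.length).find? (fun d => pvCnt paths (pvSuf p d) == 1) with
  | none =>
    have hmem : d ∈ List.range' 1 p.length := by
      rw [hf] at h2; simp at h2
      rw [List.mem_range'_1]; omega
    have := List.find?_eq_none.mp hf d hmem
    simpa using this
  | some b =>
    rw [hf] at h2; simp at h2
    obtain ⟨hpb, as, bs, heq, hprev⟩ := List.find?_eq_some_iff_append.mp hf
    have hpw : (as ++ b :: bs).Pairwise (· < ·) := by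
      rw [← heq]; exact List.pairwise_lt_range' 1
    have hdmem : d ∈ as := by
      have hd : d ∈ as ++ b :: bs := by
        rw [← heq, List.mem_range'_1]
        have : b ∈ as ++ b :: bs := by simp
        rw [← heq, List.mem_range'_1] at this
        omega
      rcases List.mem_append.mp hd with h | h
      · exact h
      · rcases List.mem_cons.mp h with h | h
        · omega
        · obtain ⟨-, hpb2, -⟩ := List.pairwise_append.mp hpw
          have := (List.pairwise_cons.mp hpb2).1 d h
          omega
    have := hprev d hdmem
    simpa using this

theorem pvMA_succ (paths : List (List String)) (p : List String)
    (h : pvMA paths p < p.length) : pvCnt paths (pvSuf p (pvMA paths p)) = 1 := by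
  unfold pvMA at *
  cases hf : (List.range' 1 p.length).find? (fun d => pvCnt paths (pvSuf p d) == 1) with
  | none => rw [hf] at h; simp at h
  | some b =>
    simp only [Option.getD_some] at h ⊢
    simpa using List.find?_some hf

-- pass1's clash dict contains exactly the duplicated keys
theorem pvPass1_snd_contains_gen (ks : List (List String))
    (se cl : PySem.Dict (List String) Nat) (k : List String) :
    ((ks.foldl (fun sc k =>
        if sc.1.contains k then (sc.1, sc.2.insert k 1) else (sc.1.insert k 1, sc.2))
      (se, cl)).2.contains k = true)
      ↔ (cl.contains k = true ∨ (se.contains k = true ∧ k ∈ ks) ∨ 2 ≤ ks.count k) := by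
  induction ks generalizing se cl with
  | nil => simp
  | cons x ks ih =>
    simp only [List.foldl_cons]
    by_cases hx : se.contains x = true
    · rw [if_pos hx, ih]
      by_cases hkx : k = x
      · subst hkx
        simp [hx, List.mem_cons]
      · simp only [PySem.Dict.contains_insert, List.count_cons, List.mem_cons]
        simp [hkx, Ne.symm hkx]
    · rw [if_neg hx, ih]
      by_cases hkx : k = x
      · subst hkx
        simp only [PySem.Dict.contains_insert, List.count_cons, List.mem_cons]
        simp [hx, ← List.count_pos_iff]
        constructor
        · rintro (h | h | h) <;> [exact Or.inl h; exact Or.inr h; exact Or.inr (by omega)]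
        · rintro (h | h) <;> [exact Or.inl h; exact Or.inr (Or.inl h)]
      · simp only [PySem.Dict.contains_insert, List.count_cons, List.mem_cons]
        simp [hkx, Ne.symm hkx]

theorem pvPass1_clash (ks : List (List String)) (k : List String) :
    ((pvPass1 ks).2.contains k = true) ↔ 2 ≤ ks.count k := by
  rw [pvPass1, pvPass1_snd_contains_gen]
  simp

theorem pvDict_size_zero {κ ν : Type} [BEq κ] [LawfulBEq κ] (d : PySem.Dict κ ν) (h : d.size = 0) (k : κ) :
    ¬ d.contains k = true := by
  intro hc
  rw [PySem.Dict.contains_iff_mem_keys] at hc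
  have hitems : d.items = [] := List.length_eq_zero_iff.mp h
  have : d.keys = [] := by simp [PySem.Dict.keys, hitems]
  rw [this] at hc
  simp at hc

-- pass2 is a map plus an any
theorem pvPass2_eq (cl : PySem.Dict (List String) Nat) (st : List (List String × Nat)) :
    pvPass2 cl st =
      (st.map (fun pl => if cl.contains (pvKeyA pl.1 pl.2) = true ∧ pl.2 < pl.1.length
          then (pl.1, pl.2 + 1) else pl),
       st.any (fun pl => cl.contains (pvKeyA pl.1 pl.2) && decide (pl.2 < pl.1.length))) := by
  suffices hgo : ∀ (st : List (List String × Nat)) (acc : List (List String × Nat)) (b : Bool),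
      st.foldl (fun acc pl =>
        if cl.contains (pvKeyA pl.1 pl.2) then
          if pl.2 < pl.1.length then (acc.1 ++ [(pl.1, pl.2 + 1)], true)
          else (acc.1 ++ [pl], acc.2)
        else (acc.1 ++ [pl], acc.2)) (acc, b)
        = (acc ++ st.map (fun pl => if cl.contains (pvKeyA pl.1 pl.2) = true ∧ pl.2 < pl.1.length
              then (pl.1, pl.2 + 1) else pl),
           b || st.any (fun pl => cl.contains (pvKeyA pl.1 pl.2) && decide (pl.2 < pl.1.length))) by
    rw [pvPass2, hgo]
    simp
  intro st
  induction st with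
  | nil => intro acc b; simp
  | cons pl st ih =>
    intro acc b
    simp only [List.foldl_cons, List.map_cons, List.any_cons]
    by_cases h1 : cl.contains (pvKeyA pl.1 pl.2) = true
    · by_cases h2 : pl.2 < pl.1.length
      · simp [h1, h2, ih]
      · simp [h1, h2, ih]
    · simp [h1, ih]

theorem pvPass2_fst (cl : PySem.Dict (List String) Nat) (st : List (List String × Nat)) :
    (pvPass2 cl st).1 =
      st.map (fun pl => if cl.contains (pvKeyA pl.1 pl.2) = true ∧ pl.2 < pl.1.length
          then (pl.1, pl.2 + 1) else pl) := by
  rw [pvPass2_eq]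

theorem pvPass2_snd (cl : PySem.Dict (List String) Nat) (st : List (List String × Nat)) :
    (pvPass2 cl st).2 =
      st.any (fun pl => cl.contains (pvKeyA pl.1 pl.2) && decide (pl.2 < pl.1.length)) := by
  rw [pvPass2_eq]

-- B's counter returns the number of (path, suffix-length) pairs producing the key
theorem pvCounts_getD (paths : List (List String)) (v : List String) :
    (pvCounts paths).getD v 0 =
      ((paths.flatMap (fun p => (PySem.List.pyRange 1 ((p.length : Int) + 1)).map (pvKeyB p))).count v : Int) := by
  suffices hgo : ∀ (d0 : PySem.Dict (List String) Int),
      (paths.foldl (fun d p =>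
          (PySem.List.pyRange 1 ((p.length : Int) + 1)).foldl
            (fun d i => d.modify (pvKeyB p i) 0 (· + 1)) d) d0).getD v 0
        = d0.getD v 0 +
          ((paths.flatMap (fun p => (PySem.List.pyRange 1 ((p.length : Int) + 1)).map (pvKeyB p))).count v : Int) by
    rw [pvCounts, hgo]
    simp
  induction paths with
  | nil => intro d0; simp
  | cons p paths ih =>
    intro d0
    simp only [List.foldl_cons, List.flatMap_cons, List.count_append]
    rw [ih]
    have hmap := List.foldl_map (f := pvKeyB p)
      (g := fun (d : PySem.Dict (List String) Int) (x : List String) => d.modify x 0 (· + 1))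
      (l := PySem.List.pyRange 1 ((p.length : Int) + 1)) (init := d0)
    rw [← hmap, PySem.Dict.getD_foldl_modify_add_one]
    push_cast
    ring

theorem pvKeys_of_path (q : List String) :
    (PySem.List.pyRange 1 ((q.length : Int) + 1)).map (pvKeyB q)
      = (List.range q.length).map (fun k => pvSuf q (k + 1)) := by
  rw [PySem.List.pyRange_one]
  have hn : ((q.length : Int) + 1 - 1).toNat = q.length := by omega
  rw [hn, List.map_map]
  refine List.map_congr_left (fun k hk => ?_)
  rw [List.mem_range] at hk
  show pvKeyB q (1 + (k : Int)) = pvSuf q (k + 1)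
  rw [pvKeyB_eq q (1 + (k : Int)) (by omega) (by exact_mod_cast by omega)]
  congr 1
  omega

theorem pvCount_keys_of (q : List String) (v : List String) (hv : 1 ≤ v.length) :
    ((List.range q.length).map (fun k => pvSuf q (k + 1))).count v
      = if v.length ≤ q.length ∧ pvSuf q v.length = v then 1 else 0 := by
  rw [List.count_eq_countP, List.countP_map]
  by_cases hc : v.length ≤ q.length ∧ pvSuf q v.length = v
  · rw [if_pos hc]
    rw [List.countP_congr (q := fun k => k == v.length - 1) ?_]
    · rw [← List.count_eq_countP]
      exact List.count_eq_one_of_mem (List.nodup_range) (by rw [List.mem_range]; omega)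
    · intro k hk
      rw [List.mem_range] at hk
      simp only [Function.comp_apply, beq_iff_eq]
      constructor
      · intro hkv
        have hlen : (pvSuf q (k + 1)).length = v.length := by rw [hkv]
        rw [pvSuf_length] at hlen
        omega
      · intro hkv
        have : k + 1 = v.length := by omega
        rw [this, hc.2]
  · rw [if_neg hc]
    rw [List.countP_eq_zero]
    intro k hk
    rw [List.mem_range] at hk
    simp only [Function.comp_apply, beq_iff_eq]
    intro hkv
    have hlen : (pvSuf q (k + 1)).length = v.length := by rw [hkv]
    rw [pvSuf_length] at hlen
    exact hc ⟨by omega, by rw [show v.length = k + 1 by omega, hkv]⟩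

theorem pvCount_allKeys (paths : List (List String)) (v : List String) (hv : 1 ≤ v.length) :
    (paths.flatMap (fun p => (PySem.List.pyRange 1 ((p.length : Int) + 1)).map (pvKeyB p))).count v
      = pvCnt paths v := by
  induction paths with
  | nil => simp [pvCnt]
  | cons p paths ih =>
    simp only [List.flatMap_cons, List.count_append, ih, pvCnt, List.countP_cons]
    rw [pvKeys_of_path, pvCount_keys_of p v hv]
    by_cases hc : v.length ≤ p.length ∧ pvSuf p v.length = v
    · rw [if_pos hc, if_pos (by simpa using hc)]
      omega
    · rw [if_neg hc, if_neg (by simpa using hc)]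
      omega

-- ==== the synchronous-round analysis ====

-- (a) a path whose suffix length is still below its target clashes
theorem pvDup_of_lt (paths : List (List String)) (r : Nat) (hr : 1 ≤ r)
    (p : List String) (hp : p ∈ paths) (hlt : r < pvMA paths p) :
    2 ≤ (paths.map (fun q => pvSuf q (min r (pvMA paths q)))).count (pvSuf p r) := by
  have hmale := pvMA_le paths p
  have hrlen : r ≤ p.length := by omega
  have hv : (pvSuf p r).length = r := by rw [pvSuf_length]; omega
  have hc1 : 1 ≤ pvCnt paths (pvSuf p r) := by
    refine Nat.one_le_iff_ne_zero.mpr (fun h0 => ?_)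
    rw [pvCnt, List.countP_eq_zero] at h0
    exact h0 p hp (by simp [hv, hrlen])
  have hc2 : 2 ≤ pvCnt paths (pvSuf p r) := by
    have := pvMA_min paths p r hr hlt
    omega
  rw [List.count_eq_countP, List.countP_map]
  refine le_trans hc2 (List.countP_mono_left (fun q hq hpred => ?_))
  simp only [hv, Bool.and_eq_true, decide_eq_true_eq, beq_iff_eq] at hpred
  obtain ⟨hq1, hq2⟩ := hpred
  simp only [Function.comp_apply, beq_iff_eq]
  have hMAq : r ≤ pvMA paths q := by
    by_contra hcon
    push_neg at hcon
    have hq' : pvMA paths q < q.length := by omega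
    have h1q := pvMA_succ paths q hq'
    have hd1 := pvMA_one_le paths q
    have hsub : pvSuf q (pvMA paths q) = pvSuf p (pvMA paths q) := by
      have e1 := pvSuf_pvSuf q (pvMA paths q) r (by omega)
      have e2 := pvSuf_pvSuf p (pvMA paths q) r (by omega)
      rw [← e1, hq2, e2]
    exact absurd (hsub ▸ h1q) (pvMA_min paths p (pvMA paths q) hd1 (by omega))
  rw [Nat.min_eq_left hMAq]
  exact hq2

-- (b) a path that reached a unique suffix strictly inside its path does not clash
theorem pvNodup_of_ge (paths : List (List String)) (r : Nat)
    (p : List String) (_hge : pvMA paths p ≤ r) (hlt : pvMA paths p < p.length) :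
    (paths.map (fun q => pvSuf q (min r (pvMA paths q)))).count (pvSuf p (pvMA paths p)) ≤ 1 := by
  have hv : (pvSuf p (pvMA paths p)).length = pvMA paths p := by rw [pvSuf_length]; omega
  rw [List.count_eq_countP, List.countP_map]
  have hmono : List.countP ((fun x => x == pvSuf p (pvMA paths p))
        ∘ (fun q => pvSuf q (min r (pvMA paths q)))) paths ≤ pvCnt paths (pvSuf p (pvMA paths p)) := by
    refine List.countP_mono_left (fun q hq hbeq => ?_)
    simp only [Function.comp_apply, beq_iff_eq] at hbeq
    have hlq : (pvSuf p (pvMA paths p)).length = min (min r (pvMA paths q)) q.length := by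
      rw [← hbeq, pvSuf_length]
    simp only [Bool.and_eq_true, decide_eq_true_eq, beq_iff_eq]
    constructor
    · omega
    · rw [hv] at hlq ⊢
      calc pvSuf q (pvMA paths p)
          = pvSuf q (min (min r (pvMA paths q)) q.length) := by rw [hlq]
        _ = pvSuf q (min r (pvMA paths q)) := pvSuf_truncate q _
        _ = pvSuf p (pvMA paths p) := hbeq
  have := pvMA_succ paths p hlt
  omega

theorem pvExt_iff (paths : List (List String)) (r : Nat) (hr : 1 ≤ r)
    (p : List String) (hp : p ∈ paths) :
    (2 ≤ (paths.map (fun q => pvSuf q (min r (pvMA paths q)))).count (pvSuf p (min r (pvMA paths p)))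
        ∧ min r (pvMA paths p) < p.length)
      ↔ r < pvMA paths p := by
  have hmale := pvMA_le paths p
  constructor
  · rintro ⟨hdup, hlen⟩
    by_contra hcon
    push_neg at hcon
    by_cases hML : pvMA paths p < p.length
    · have hnd := pvNodup_of_ge paths r p hcon hML
      rw [Nat.min_eq_right hcon] at hdup
      omega
    · push_neg at hML
      omega
  · intro hlt
    have hd := pvDup_of_lt paths r hr p hp hlt
    rw [Nat.min_eq_left (le_of_lt hlt)]
    exact ⟨hd, by omega⟩

theorem pvKeys_state (paths : List (List String)) (r : Nat) (hr : 1 ≤ r) :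
    ((paths.map (fun p => (p, min r (pvMA paths p)))).map (fun pl => pvKeyA pl.1 pl.2))
      = paths.map (fun q => pvSuf q (min r (pvMA paths q))) := by
  rw [List.map_map]
  refine List.map_congr_left (fun p hp => ?_)
  exact pvKeyA_eq p _ (Nat.le_min.mpr ⟨hr, pvMA_one_le paths p⟩)

theorem pvLoop_conv (paths : List (List String)) (fuel r : Nat) (hr : 1 ≤ r)
    (hb : ∀ p ∈ paths, pvMA paths p ≤ r + fuel) :
    pvLoopA fuel (paths.map (fun p => (p, min r (pvMA paths p))))
      = paths.map (fun p => (p, pvMA paths p)) := by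
  induction fuel generalizing r with
  | zero =>
    simp only [pvLoopA]
    refine List.map_congr_left (fun p hp => ?_)
    have := hb p hp
    rw [show min r (pvMA paths p) = pvMA paths p by omega]
  | succ fuel ih =>
    have hkeys := pvKeys_state paths r hr
    simp only [pvLoopA, hkeys]
    have hcond : ∀ p ∈ paths,
        (((pvPass1 (paths.map (fun q => pvSuf q (min r (pvMA paths q))))).2.contains
            (pvKeyA p (min r (pvMA paths p))) = true ∧ min r (pvMA paths p) < p.length)
          ↔ r < pvMA paths p) := by
      intro p hp
      rw [pvKeyA_eq _ _ (Nat.le_min.mpr ⟨hr, pvMA_one_le paths p⟩), pvPass1_clash]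
      exact pvExt_iff paths r hr p hp
    by_cases hsz : (pvPass1 (paths.map (fun q => pvSuf q (min r (pvMA paths q))))).2.size = 0
    · rw [if_pos hsz]
      refine List.map_congr_left (fun p hp => ?_)
      have hle : pvMA paths p ≤ r := by
        by_contra hcon
        push_neg at hcon
        exact pvDict_size_zero _ hsz _ ((hcond p hp).mpr hcon).1
      rw [show min r (pvMA paths p) = pvMA paths p by omega]
    · have hmap : (paths.map (fun p => (p, min r (pvMA paths p)))).map
          (fun pl => if (pvPass1 (paths.map (fun q => pvSuf q (min r (pvMA paths q))))).2.contains
              (pvKeyA pl.1 pl.2) = true ∧ pl.2 < pl.1.length then (pl.1, pl.2 + 1) else pl)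
          = paths.map (fun p => (p, min (r + 1) (pvMA paths p))) := by
        rw [List.map_map]
        refine List.map_congr_left (fun p hp => ?_)
        simp only [Function.comp_apply]
        by_cases hlt : r < pvMA paths p
        · rw [if_pos ((hcond p hp).mpr hlt)]
          rw [show min r (pvMA paths p) + 1 = min (r + 1) (pvMA paths p) by omega]
        · rw [if_neg (fun hc => hlt ((hcond p hp).mp hc))]
          rw [show min r (pvMA paths p) = min (r + 1) (pvMA paths p) by omega]
      rw [if_neg hsz, pvPass2_snd, pvPass2_fst, hmap]
      by_cases hch : ∃ p ∈ paths, r < pvMA paths p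
      · have hYt : ((paths.map (fun p => (p, min r (pvMA paths p)))).any
            (fun pl => (pvPass1 (paths.map (fun q => pvSuf q (min r (pvMA paths q))))).2.contains
                (pvKeyA pl.1 pl.2) && decide (pl.2 < pl.1.length))) = true := by
          rw [List.any_eq_true]
          obtain ⟨p, hp, hlt⟩ := hch
          refine ⟨(p, min r (pvMA paths p)), List.mem_map_of_mem hp, ?_⟩
          rw [Bool.and_eq_true, decide_eq_true_eq]
          exact (hcond p hp).mpr hlt
        rw [hYt, if_pos rfl]
        exact ih (r + 1) (by omega) (fun p hp => by have := hb p hp; omega)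
      · have hYf : ((paths.map (fun p => (p, min r (pvMA paths p)))).any
            (fun pl => (pvPass1 (paths.map (fun q => pvSuf q (min r (pvMA paths q))))).2.contains
                (pvKeyA pl.1 pl.2) && decide (pl.2 < pl.1.length))) = false := by
          refine Bool.eq_false_iff.mpr (fun hbt => ?_)
          rw [List.any_eq_true] at hbt
          obtain ⟨pl, hpl, hc⟩ := hbt
          rw [List.mem_map] at hpl
          obtain ⟨p, hp, rfl⟩ := hpl
          rw [Bool.and_eq_true, decide_eq_true_eq] at hc
          exact hch ⟨p, hp, (hcond p hp).mp hc⟩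
        rw [hYf, if_neg (by simp)]
        refine List.map_congr_left (fun p hp => ?_)
        have hle : pvMA paths p ≤ r := by
          by_contra hcon
          push_neg at hcon
          exact hch ⟨p, hp, hcon⟩
        rw [show min (r + 1) (pvMA paths p) = pvMA paths p by omega]

theorem pvFind?_congr_mem {α : Type} (l : List α) (p q : α → Bool)
    (h : ∀ x ∈ l, p x = q x) : l.find? p = l.find? q := by
  induction l with
  | nil => rfl
  | cons x xs ih =>
    rw [List.find?_cons, List.find?_cons, h x (List.mem_cons_self)]
    cases q x with
    | true => rfl
    | false => exact ih (fun y hy => h y (List.mem_cons_of_mem _ hy))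

-- the suffix B selects for a path is exactly the one of length pvMA
theorem pvAlt_key (paths : List (List String)) (p : List String) :
    pvKeyB p (((PySem.List.pyRange 1 ((p.length : Int) + 1)).find?
        (fun i => (pvCounts paths).getD (pvKeyB p i) 0 == 1)).getD (p.length : Int))
      = pvSuf p (pvMA paths p) := by
  by_cases h0 : p.length = 0
  · obtain rfl : p = [] := List.length_eq_zero_iff.mp h0
    have hnil : PySem.List.pyRange 1 (((([] : List String).length : Int)) + 1) = [] := by
      simp [PySem.List.pyRange_one_eq_nil]
    rw [hnil]
    simp only [List.find?_nil, Option.getD_none, List.length_nil, Nat.cast_zero]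
    rw [pvKeyB_eq ([] : List String) 0 le_rfl (by simp)]
    simp [pvSuf]
  · have hlen1 : 1 ≤ p.length := by omega
    have hfb : (PySem.List.pyRange 1 ((p.length : Int) + 1)).find?
          (fun i => (pvCounts paths).getD (pvKeyB p i) 0 == 1)
        = ((List.range p.length).find?
            (fun k => pvCnt paths (pvSuf p (1 + k)) == 1)).map (fun (k : Nat) => (1 : Int) + (k : Int)) := by
      rw [PySem.List.pyRange_one]
      rw [show ((p.length : Int) + 1 - 1).toNat = p.length by omega]
      rw [List.find?_map]
      rw [pvFind?_congr_mem (List.range p.length) _ _ (fun k hk => ?_)]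
      rw [List.mem_range] at hk
      show ((pvCounts paths).getD (pvKeyB p (1 + (k : Int))) 0 == 1)
          = (pvCnt paths (pvSuf p (1 + k)) == 1)
      rw [pvKeyB_eq p (1 + (k : Int)) (by omega) (by exact_mod_cast by omega)]
      rw [show ((1 : Int) + (k : Int)).toNat = 1 + k by omega]
      rw [pvCounts_getD, pvCount_allKeys paths _ (by rw [pvSuf_length]; omega)]
      by_cases hcc : pvCnt paths (pvSuf p (1 + k)) = 1 <;> simp [hcc]
    have hfa : (List.range' 1 p.length).find? (fun d => pvCnt paths (pvSuf p d) == 1)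
        = ((List.range p.length).find?
            (fun k => pvCnt paths (pvSuf p (1 + k)) == 1)).map (fun k => 1 + k) := by
      rw [List.range'_eq_map_range, List.find?_map]
      rfl
    rw [hfb]
    unfold pvMA
    rw [hfa]
    cases hf : (List.range p.length).find? (fun k => pvCnt paths (pvSuf p (1 + k)) == 1) with
    | none =>
      simp only [Option.map_none, Option.getD_none]
      rw [pvKeyB_eq p (p.length : Int) (by omega) le_rfl]
      rw [show ((p.length : Int)).toNat = p.length by omega,
        show max p.length 1 = p.length by omega]
    | some k =>
      have hkmem := List.mem_of_find?_eq_some hf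
      rw [List.mem_range] at hkmem
      simp only [Option.map_some, Option.getD_some]
      rw [pvKeyB_eq p (1 + (k : Int)) (by omega) (by exact_mod_cast by omega)]
      rw [show ((1 : Int) + (k : Int)).toNat = 1 + k by omega]

-- ===== VERDICT (by name: the statement is the Claim_ definition above) =====
theorem minimal_unique_suffixes_py_spec : Claim_equal_minimal_unique_suffixes_py := by
  intro paths _
  show minimal_unique_suffixes_py paths = minimal_unique_suffixes_py_alt paths
  simp only [minimal_unique_suffixes_py, minimal_unique_suffixes_py_alt]
  have hinit : paths.map (fun p => (p, 1))
      = paths.map (fun p => (p, min 1 (pvMA paths p))) :=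
    List.map_congr_left (fun p _ => by
      rw [Nat.min_eq_left (pvMA_one_le paths p)])
  have hsum : paths.foldl (fun a p => a + p.length) 0 = (paths.map List.length).sum := by
    rw [List.sum_eq_foldl, List.foldl_map]
  have hb : ∀ p ∈ paths,
      pvMA paths p ≤ 1 + (paths.foldl (fun a p => a + p.length) 0 + 2) := by
    intro p hp
    have h2 : p.length ≤ (paths.map List.length).sum :=
      List.single_le_sum (by simp) _ (List.mem_map_of_mem hp)
    have h3 := pvMA_le paths p
    rw [hsum]
    omega
  rw [hinit, pvLoop_conv paths _ 1 le_rfl hb]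
  rw [PySem.List.foldl_append_singleton_eq_map, PySem.List.foldl_append_singleton_eq_map]
  rw [List.map_map]
  refine List.map_congr_left (fun p hp => ?_)
  simp only [Function.comp_apply]
  rw [pvAlt_key paths p, pvKeyA_eq p _ (pvMA_one_le paths p)]
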